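-- pv_equiv track=rewrite | github.com/rhaffle87/python_sim | random/rd_compare.py | zigzag_indices
-- ===== SOURCE A (Python) =====
-- def zigzag_indices(n=8):
--     # returns list of (r,c) in zigzag order for n x n
--     idx = []
--     for s in range(2*n-1):
--         if s % 2 == 0:
--             rstart = min(s, n-1)
--             for r in range(rstart, -1, -1):
--                 c = s - r
--                 if c < n:
--                     idx.append((r,c))
--         else:
--             cstart = min(s, n-1)
--             for c in range(cstart, -1, -1):
--                 r = s - c
--                 if r < n:
--                     idx.append((r,c))
--     return idx
-- ===== SOURCE B (Python) =====
-- def zigzag_indices(n=8):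
--     # Two-pass bucket approach: group cells by diagonal r+c, then emit,
--     # reversing even diagonals to match the zigzag sweep directions.
--     buckets = [[] for _ in range(2 * n - 1)]
--     for r in range(n):
--         for c in range(n):
--             buckets[r + c].append((r, c))
--     out = []
--     for s in range(2 * n - 1):
--         if s % 2 == 0:
--             out.extend(reversed(buckets[s]))
--         else:
--             out.extend(buckets[s])
--     return out
-- ===== Notes on version B (the rewrite author's own statement) =====
-- stated objective: alternative
-- what changed: Replaces A's per-diagonal bidirectional sweeps (with min-based start indices and in-loop bound checks) by a two-pass bucket scheme: one row-major pass groups all cells into 2n-1 diagonal buckets, then a second pass emits each bucket, reversed on even diagonals.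
import Mathlib
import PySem

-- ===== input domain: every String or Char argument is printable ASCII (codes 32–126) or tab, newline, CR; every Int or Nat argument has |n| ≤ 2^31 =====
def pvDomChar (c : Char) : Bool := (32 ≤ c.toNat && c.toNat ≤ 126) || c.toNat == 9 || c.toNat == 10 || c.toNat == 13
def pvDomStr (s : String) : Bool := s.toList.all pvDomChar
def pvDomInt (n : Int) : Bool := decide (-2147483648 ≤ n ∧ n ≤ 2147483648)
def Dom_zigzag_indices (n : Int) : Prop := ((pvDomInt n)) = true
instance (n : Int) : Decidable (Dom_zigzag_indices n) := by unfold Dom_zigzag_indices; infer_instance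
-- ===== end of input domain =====

-- B replaces A's per-diagonal bidirectional sweeps by a two-pass bucket scheme (group cells by r+c,
-- then emit each bucket, reversed on even diagonals): an alternative decomposition, same O(n^2) cost.

-- ===== PORT A =====
-- literal transliteration of Source A's zigzag_indices (outer loop over s, branch on parity,
-- inner countdown loops with an in-loop bound check appending to idx)
def zigzag_indices (n : Int) : List (Int × Int) :=
  (PySem.List.pyRange 0 (2*n-1) 1).foldl (fun idx s =>
    if PySem.Int.mod s 2 = 0 then
      (PySem.List.pyRange (min s (n-1)) (-1) (-1)).foldl (fun idx r =>
        let c := s - r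
        if c < n then idx ++ [(r, c)] else idx) idx
    else
      (PySem.List.pyRange (min s (n-1)) (-1) (-1)).foldl (fun idx c =>
        let r := s - c
        if r < n then idx ++ [(r, c)] else idx) idx) []

-- ===== PORT B =====
-- literal transliteration of Source B: build 2n-1 diagonal buckets row-major, then emit them,
-- reversing even diagonals. Python's buckets[r+c].append((r,c)) is ported with pySetD/pyGetD;
-- the index r+c is always in range (0 ≤ r+c ≤ 2n-2 < 2n-1), so pySetD/pyGetD are exact here.
def zigzag_indices_alt (n : Int) : List (Int × Int) :=
  let buckets0 : List (List (Int × Int)) := (PySem.List.pyRange 0 (2*n-1) 1).map (fun _ => [])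
  let buckets := (PySem.List.pyRange 0 n 1).foldl (fun bs r =>
    (PySem.List.pyRange 0 n 1).foldl (fun bs c =>
      PySem.List.pySetD bs (r + c) (PySem.List.pyGetD bs (r + c) [] ++ [(r, c)])) bs) buckets0
  (PySem.List.pyRange 0 (2*n-1) 1).foldl (fun out s =>
    if PySem.Int.mod s 2 = 0 then out ++ (PySem.List.pyGetD buckets s []).reverse
    else out ++ PySem.List.pyGetD buckets s []) []

-- ===== PRECONDITION & SPEC =====
def Spec_zigzag_indices (n : Int) (out : List (Int × Int)) : Prop := out = zigzag_indices_alt n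
instance (n : Int) (out : List (Int × Int)) : Decidable (Spec_zigzag_indices n out) := by unfold Spec_zigzag_indices; infer_instance

-- ===== CLAIM (what is proved, stated in full; the proofs are below) =====
def Claim_equal_zigzag_indices : Prop := ∀ (n : Int), Dom_zigzag_indices n → Spec_zigzag_indices n (zigzag_indices n)

-- ===== LEMMAS AND PROOFS =====
-- getD over pySetD, Int index
theorem getD_setD (xs : List (List (Int × Int))) (i : Int) (hi : 0 ≤ i) (v : List (Int × Int))
    (m : Nat) (hm : m < xs.length) :
    PySem.List.pyGetD (PySem.List.pySetD xs i v) (m : Int) [] =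
      if (m : Int) = i then v else PySem.List.pyGetD xs (m : Int) [] := by
  rw [PySem.List.pySetD_of_nonneg xs v hi]
  simp only [PySem.List.pyGetD_natCast]
  rcases eq_or_ne (m : Int) i with h | h
  · have : i.toNat = m := by omega
    subst this
    simp [List.getD_eq_getElem?_getD, hm, h]
  · have hne : i.toNat ≠ m := by omega
    simp [List.getD_eq_getElem?_getD, hne, h]

theorem inner_len (r : Int) : ∀ (L : List Int) (bs : List (List (Int × Int))),
    (L.foldl (fun bs c => PySem.List.pySetD bs (r + c) (PySem.List.pyGetD bs (r + c) [] ++ [(r, c)])) bs).length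
      = bs.length := by
  intro L
  induction L with
  | nil => intro bs; rfl
  | cons x xs ih => intro bs; rw [List.foldl_cons, ih, PySem.List.length_pySetD]

theorem inner_getD (r : Int) (hr : 0 ≤ r) : ∀ (k : Nat) (bs : List (List (Int × Int))) (m : Nat), m < bs.length →
    PySem.List.pyGetD ((PySem.List.pyRange 0 (k : Int) 1).foldl
        (fun bs c => PySem.List.pySetD bs (r + c) (PySem.List.pyGetD bs (r + c) [] ++ [(r, c)])) bs) (m : Int) []
      = PySem.List.pyGetD bs (m : Int) [] ++
          (if r ≤ (m : Int) ∧ (m : Int) < r + k then [(r, (m : Int) - r)] else []) := by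
  intro k
  induction k with
  | zero =>
    intro bs m hm
    rw [PySem.List.pyRange_one_eq_nil (by omega)]
    simp only [List.foldl_nil]
    rw [if_neg (by omega)]
    simp
  | succ k ih =>
    intro bs m hm
    have hcast : ((k + 1 : Nat) : Int) = (k : Int) + 1 := by push_cast; ring
    rw [hcast, PySem.List.pyRange_one_succ_right (by omega), List.foldl_append, List.foldl_cons, List.foldl_nil]
    have hlen : ((PySem.List.pyRange 0 (k : Int) 1).foldl
        (fun bs c => PySem.List.pySetD bs (r + c) (PySem.List.pyGetD bs (r + c) [] ++ [(r, c)])) bs).length = bs.length :=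
      inner_len r _ bs
    rw [getD_setD _ _ (by omega) _ m (by omega)]
    rcases eq_or_ne ((m : Int)) (r + (k : Int)) with h | h
    · rw [if_pos h, show r + (k:Int) = (m:Int) from h.symm, ih bs m hm, if_neg (by omega), if_pos (by omega)]
      simp only [List.append_nil, List.append_cancel_left_eq, List.cons.injEq, and_true, Prod.mk.injEq, true_and]
      omega
    · rw [if_neg h, ih bs m hm]
      rcases Decidable.em (r ≤ (m : Int) ∧ (m : Int) < r + (k : Int)) with hc | hc
      · rw [if_pos hc, if_pos (by omega)]
      · rw [if_neg hc, if_neg (by omega)]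

theorem rows_len (n : Int) : ∀ (L : List Int) (bs : List (List (Int × Int))),
    (L.foldl (fun bs r => (PySem.List.pyRange 0 n 1).foldl
        (fun bs c => PySem.List.pySetD bs (r + c) (PySem.List.pyGetD bs (r + c) [] ++ [(r, c)])) bs) bs).length
      = bs.length := by
  intro L
  induction L with
  | nil => intro bs; rfl
  | cons x xs ih => intro bs; rw [List.foldl_cons, ih, inner_len]

theorem inner_getD' (r : Int) (hr : 0 ≤ r) (N : Int) (hN : 0 ≤ N) (bs : List (List (Int × Int)))
    (m : Nat) (hm : m < bs.length) :
    PySem.List.pyGetD ((PySem.List.pyRange 0 N 1).foldl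
        (fun bs c => PySem.List.pySetD bs (r + c) (PySem.List.pyGetD bs (r + c) [] ++ [(r, c)])) bs) (m : Int) []
      = PySem.List.pyGetD bs (m : Int) [] ++
          (if r ≤ (m : Int) ∧ (m : Int) < r + N then [(r, (m : Int) - r)] else []) := by
  have hc : N = ((N.toNat : Nat) : Int) := by omega
  rw [hc]
  exact inner_getD r hr N.toNat bs m hm

theorem rows_getD (n : Int) (hn : 0 < n) : ∀ (k : Nat) (m : Nat), m < (2*n-1).toNat →
    PySem.List.pyGetD ((PySem.List.pyRange 0 (k : Int) 1).foldl
        (fun bs r => (PySem.List.pyRange 0 n 1).foldl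
          (fun bs c => PySem.List.pySetD bs (r + c) (PySem.List.pyGetD bs (r + c) [] ++ [(r, c)])) bs)
        ((PySem.List.pyRange 0 (2*n-1) 1).map (fun _ => ([] : List (Int × Int))))) (m : Int) []
      = ((PySem.List.pyRange 0 (k : Int) 1).filter
          (fun r => decide (r ≤ (m : Int) ∧ (m : Int) < r + n))).map (fun r => (r, (m : Int) - r)) := by
  intro k
  induction k with
  | zero =>
    intro m hm
    rw [show ((0 : Nat) : Int) = 0 from rfl, PySem.List.pyRange_one_eq_nil (le_refl 0)]
    simp only [List.foldl_nil, List.filter_nil, List.map_nil]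
    rw [PySem.List.pyGetD_map_pyRange_of_nonneg (fun _ => ([] : List (Int × Int))) (2*n-1) (m : Int) []
      (by omega) (by omega)]
  | succ k ih =>
    intro m hm
    have hcast : ((k + 1 : Nat) : Int) = (k : Int) + 1 := by push_cast; ring
    rw [hcast, PySem.List.pyRange_one_succ_right (by omega), List.foldl_append, List.foldl_cons, List.foldl_nil,
        List.filter_append, List.map_append]
    set P := ((PySem.List.pyRange 0 (k : Int) 1).foldl
        (fun bs r => (PySem.List.pyRange 0 n 1).foldl
          (fun bs c => PySem.List.pySetD bs (r + c) (PySem.List.pyGetD bs (r + c) [] ++ [(r, c)])) bs)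
        ((PySem.List.pyRange 0 (2*n-1) 1).map (fun _ => ([] : List (Int × Int))))) with hP
    have hlen : P.length = (2*n-1).toNat := by
      rw [hP, rows_len, List.length_map, PySem.List.length_pyRange_one]
      omega
    rw [inner_getD' (k : Int) (by omega) n (by omega) P m (by omega)]
    rw [hP, ih m hm]
    simp only [List.filter_cons, List.filter_nil]
    rcases Decidable.em ((k : Int) ≤ (m : Int) ∧ (m : Int) < (k : Int) + n) with hc | hc
    · rw [if_pos (by omega), if_pos (by simpa using hc)]
      simp
    · rw [if_neg (by omega), if_neg (by simpa using hc)]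
      simp

theorem countdown_as_map (s m : Int) :
    PySem.List.pyRange m (-1) (-1) = (PySem.List.pyRange (s - m) (s + 1) 1).map (fun r => s - r) := by
  rw [PySem.List.pyRange_neg_one, PySem.List.pyRange_one, List.map_map]
  have h : (s + 1 - (s - m)).toNat = (m - (-1)).toNat := by omega
  rw [h]
  apply List.map_congr_left
  intro k hk
  simp only [Function.comp_apply]
  omega

theorem diag_core (n s : Int) (_h1 : 0 < n) (h0 : 0 ≤ s) (h2 : s < 2*n-1) :
    ((PySem.List.pyRange 0 n 1).filter (fun r => decide (r ≤ s ∧ s < r + n))).map (fun r => (r, s - r))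
      = (PySem.List.pyRange (s - min s (n-1)) (min s (n-1) + 1) 1).map (fun r => (r, s - r)) := by
  rw [PySem.List.pyRange_one_append 0 (s - min s (n-1)) n (by omega) (by omega),
      PySem.List.pyRange_one_append (s - min s (n-1)) (min s (n-1) + 1) n (by omega) (by omega),
      List.filter_append, List.filter_append]
  rw [List.filter_eq_nil_iff.mpr (fun r hr => by
        simp only [PySem.List.mem_pyRange_one] at hr; simp only [decide_eq_true_eq]; omega)]
  rw [List.filter_eq_self.mpr (fun r hr => by
        simp only [PySem.List.mem_pyRange_one] at hr; simp only [decide_eq_true_eq]; omega)]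
  rw [List.filter_eq_nil_iff.mpr (fun r hr => by
        simp only [PySem.List.mem_pyRange_one] at hr; simp only [decide_eq_true_eq]; omega)]
  simp

theorem even_core (n s : Int) (_h1 : 0 < n) (h0 : 0 ≤ s) (h2 : s < 2*n-1) :
    ((PySem.List.pyRange 0 (min s (n-1) + 1) 1).filter (fun r => decide (s - r < n))).map (fun r => (r, s - r))
      = (PySem.List.pyRange (s - min s (n-1)) (min s (n-1) + 1) 1).map (fun r => (r, s - r)) := by
  rw [PySem.List.pyRange_one_append 0 (s - min s (n-1)) (min s (n-1) + 1) (by omega) (by omega),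
      List.filter_append]
  rw [List.filter_eq_nil_iff.mpr (fun r hr => by
        simp only [PySem.List.mem_pyRange_one] at hr; simp only [decide_eq_true_eq]; omega)]
  rw [List.filter_eq_self.mpr (fun r hr => by
        simp only [PySem.List.mem_pyRange_one] at hr; simp only [decide_eq_true_eq]; omega)]
  simp

theorem odd_core (n s : Int) (_h1 : 0 < n) (h0 : 0 ≤ s) (h2 : s < 2*n-1) :
    ((PySem.List.pyRange (s - min s (n-1)) (s + 1) 1).filter (fun r => decide (r < n))).map (fun r => (r, s - r))
      = (PySem.List.pyRange (s - min s (n-1)) (min s (n-1) + 1) 1).map (fun r => (r, s - r)) := by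
  rw [PySem.List.pyRange_one_append (s - min s (n-1)) (min s (n-1) + 1) (s + 1) (by omega) (by omega),
      List.filter_append]
  rw [List.filter_eq_self.mpr (fun r hr => by
        simp only [PySem.List.mem_pyRange_one] at hr; simp only [decide_eq_true_eq]; omega)]
  rw [List.filter_eq_nil_iff.mpr (fun r hr => by
        simp only [PySem.List.mem_pyRange_one] at hr; simp only [decide_eq_true_eq]; omega)]
  simp


-- ===== VERDICT (by name: the statement is the Claim_ definition above) =====
theorem zigzag_indices_spec : Claim_equal_zigzag_indices := by
  intro n _
  unfold Spec_zigzag_indices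
  show zigzag_indices n = zigzag_indices_alt n

  by_cases hn' : n ≤ 0
  · unfold zigzag_indices zigzag_indices_alt
    rw [PySem.List.pyRange_one_eq_nil (show (2*n-1 : Int) ≤ 0 by omega)]
    simp
  · have hn : 0 < n := by omega
    unfold zigzag_indices
    simp only [zigzag_indices_alt]
    have hbA : (fun (idx : List (Int × Int)) (s : Int) =>
        if PySem.Int.mod s 2 = 0 then
          (PySem.List.pyRange (min s (n-1)) (-1) (-1)).foldl (fun idx r =>
            let c := s - r
            if c < n then idx ++ [(r, c)] else idx) idx
        else
          (PySem.List.pyRange (min s (n-1)) (-1) (-1)).foldl (fun idx c =>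
            let r := s - c
            if r < n then idx ++ [(r, c)] else idx) idx)
      = (fun idx s => idx ++
          (if PySem.Int.mod s 2 = 0 then
            ((PySem.List.pyRange (min s (n-1)) (-1) (-1)).filter (fun r => decide (s - r < n))).map
              (fun r => (r, s - r))
          else
            ((PySem.List.pyRange (min s (n-1)) (-1) (-1)).filter (fun c => decide (s - c < n))).map
              (fun c => (s - c, c)))) := by
      funext idx s
      split_ifs with hp
      · exact PySem.List.foldl_append_ite _ _ _ _
      · exact PySem.List.foldl_append_ite _ _ _ _
    rw [hbA, PySem.List.foldl_append_eq_flatMap]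
    have hbB : (fun (out : List (Int × Int)) (s : Int) =>
        if PySem.Int.mod s 2 = 0 then
          out ++ (PySem.List.pyGetD ((PySem.List.pyRange 0 n 1).foldl (fun bs r =>
            (PySem.List.pyRange 0 n 1).foldl (fun bs c =>
              PySem.List.pySetD bs (r + c) (PySem.List.pyGetD bs (r + c) [] ++ [(r, c)])) bs)
            ((PySem.List.pyRange 0 (2*n-1) 1).map (fun _ => []))) s []).reverse
        else
          out ++ PySem.List.pyGetD ((PySem.List.pyRange 0 n 1).foldl (fun bs r =>
            (PySem.List.pyRange 0 n 1).foldl (fun bs c =>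
              PySem.List.pySetD bs (r + c) (PySem.List.pyGetD bs (r + c) [] ++ [(r, c)])) bs)
            ((PySem.List.pyRange 0 (2*n-1) 1).map (fun _ => []))) s [])
      = (fun out s => out ++
          (if PySem.Int.mod s 2 = 0 then
            (PySem.List.pyGetD ((PySem.List.pyRange 0 n 1).foldl (fun bs r =>
              (PySem.List.pyRange 0 n 1).foldl (fun bs c =>
                PySem.List.pySetD bs (r + c) (PySem.List.pyGetD bs (r + c) [] ++ [(r, c)])) bs)
              ((PySem.List.pyRange 0 (2*n-1) 1).map (fun _ => []))) s []).reverse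
          else
            PySem.List.pyGetD ((PySem.List.pyRange 0 n 1).foldl (fun bs r =>
              (PySem.List.pyRange 0 n 1).foldl (fun bs c =>
                PySem.List.pySetD bs (r + c) (PySem.List.pyGetD bs (r + c) [] ++ [(r, c)])) bs)
              ((PySem.List.pyRange 0 (2*n-1) 1).map (fun _ => []))) s [])) := by
      funext out s
      split_ifs <;> rfl
    rw [hbB, PySem.List.foldl_append_eq_flatMap]
    simp only [List.nil_append]
    apply List.flatMap_congr
    intro s hs
    rw [PySem.List.mem_pyRange_one] at hs
    have hbucket : PySem.List.pyGetD ((PySem.List.pyRange 0 n 1).foldl (fun bs r =>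
          (PySem.List.pyRange 0 n 1).foldl (fun bs c =>
            PySem.List.pySetD bs (r + c) (PySem.List.pyGetD bs (r + c) [] ++ [(r, c)])) bs)
          ((PySem.List.pyRange 0 (2*n-1) 1).map (fun _ => []))) s []
        = (PySem.List.pyRange (s - min s (n-1)) (min s (n-1) + 1) 1).map (fun r => (r, s - r)) := by
      have h := rows_getD n hn n.toNat s.toNat (by omega)
      rw [show ((n.toNat : Nat) : Int) = n from by omega,
          show ((s.toNat : Nat) : Int) = s from by omega] at h
      rw [h]
      exact diag_core n s hn hs.1 hs.2
    rw [hbucket]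
    split_ifs with hp
    · -- even diagonal: A sweeps r downward = reverse of the bucket
      rw [PySem.List.pyRange_neg_one_eq_reverse, List.filter_reverse, List.map_reverse]
      rw [show ((-1 : Int) + 1) = 0 from by ring]
      rw [even_core n s hn hs.1 hs.2]
    · -- odd diagonal: A sweeps c downward = r upward = the bucket as-is
      rw [countdown_as_map s (min s (n-1)), List.filter_map, List.map_map]
      have hpred : ((fun c => decide (s - c < n)) ∘ (fun r => s - r)) = (fun r => decide (r < n)) := by
        funext r
        simp only [Function.comp_apply, sub_sub_cancel]
      have hfun : ((fun c => ((s - c : Int), c)) ∘ (fun r => s - r)) = (fun r => (r, s - r)) := by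
        funext r
        simp only [Function.comp_apply, sub_sub_cancel]
      rw [hpred, hfun, odd_core n s hn hs.1 hs.2]
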